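-- pv_equiv track=rewrite | github.com/Wulfic/Cicada3301 | LiberPrimus/pages/page_00/analysis/concat_pages_analysis.py | find_common_ngrams
-- ===== SOURCE A (Python) =====
-- def find_common_ngrams(texts, n=4):
--     """Find n-grams common across all texts."""
--     from collections import Counter
--
--     ngram_sets = []
--     for text in texts:
--         ngrams = Counter()
--         for i in range(len(text) - n + 1):
--             ngrams[text[i:i+n]] += 1
--         ngram_sets.append(set(ngrams.keys()))
--
--     # Find intersection
--     common = ngram_sets[0]
--     for s in ngram_sets[1:]:
--         common &= s
--
--     return common
-- ===== SOURCE B (Python) =====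
-- def find_common_ngrams(texts, n=4):
--     """Find n-grams common across all texts."""
--     counts = {}
--     for text in texts:
--         seen = set()
--         for i in range(len(text) - n + 1):
--             g = text[i:i+n]
--             if g not in seen:
--                 seen.add(g)
--                 counts[g] = counts.get(g, 0) + 1
--     return {g for g, c in counts.items() if c == len(texts)}
-- ===== Notes on version B (the rewrite author's own statement) =====
-- stated objective: faster
-- what changed: Replaces A's per-text Counter construction plus chained pairwise set intersections with a single global dict that counts, for each n-gram, in how many texts it occurs (deduplicated per text via a seen-set), then keeps the n-grams whose count equals len(texts).
-- outside the precondition, e.g. on find_common_ngrams([], 4): A raises IndexError, B returns set()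
import Mathlib
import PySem

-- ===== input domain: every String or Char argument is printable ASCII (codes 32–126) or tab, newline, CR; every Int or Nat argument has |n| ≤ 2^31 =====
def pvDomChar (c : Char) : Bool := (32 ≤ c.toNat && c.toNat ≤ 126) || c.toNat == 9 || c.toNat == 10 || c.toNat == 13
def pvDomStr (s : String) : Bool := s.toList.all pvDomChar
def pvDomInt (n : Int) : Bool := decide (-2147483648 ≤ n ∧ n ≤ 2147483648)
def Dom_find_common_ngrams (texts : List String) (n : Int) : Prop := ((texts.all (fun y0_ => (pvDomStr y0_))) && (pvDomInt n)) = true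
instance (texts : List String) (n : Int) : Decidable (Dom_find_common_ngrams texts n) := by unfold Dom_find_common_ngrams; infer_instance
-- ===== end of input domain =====

-- B replaces A's per-text Counter + pairwise set intersection by one shared dict counting,
-- per text, each distinct n-gram once, then keeps the n-grams whose count equals len(texts)
-- (objective: faster — one accumulation pass, no per-text Counter or intersection passes).


-- ===== PORT A =====
def find_common_ngrams (texts : List String) (n : Int) : List String :=
  let ngram_sets : List (PySem.Set String) :=
    texts.foldl (fun acc text =>
      let ngrams : PySem.Dict String Int :=
        (PySem.List.pyRange 0 (PySem.Str.len text - n + 1) 1).foldl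
          (fun d i => d.modify (PySem.Str.slice text (some i) (some (i + n))) 0 (· + 1))
          PySem.Dict.empty
      acc ++ [PySem.Set.ofList ngrams.keys]) []
  match ngram_sets with
  | [] => []  -- Python raises IndexError here (ngram_sets[0]); excluded by Pre_
  | c :: rest => rest.foldl (fun common s => PySem.Set.inter common s) c

-- ===== PORT B =====
def find_common_ngrams_alt (texts : List String) (n : Int) : List String :=
  let counts : PySem.Dict String Int :=
    texts.foldl (fun counts text =>
      ((PySem.List.pyRange 0 (PySem.Str.len text - n + 1) 1).foldl
        (fun (st : PySem.Set String × PySem.Dict String Int) i =>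
          let g := PySem.Str.slice text (some i) (some (i + n))
          if PySem.Set.contains st.1 g then st
          else (PySem.Set.add st.1 g, st.2.insert g (st.2.getD g 0 + 1)))
        (PySem.Set.empty, counts)).2) PySem.Dict.empty
  PySem.Set.ofList ((counts.items.filter (fun p => p.2 == (texts.length : Int))).map (·.1))

-- ===== PRECONDITION & SPEC =====
-- Pre_ excludes only texts = [], where A raises IndexError (ngram_sets[0]).
def Pre_find_common_ngrams (texts : List String) (n : Int) : Prop := texts ≠ []
instance (texts : List String) (n : Int) : Decidable (Pre_find_common_ngrams texts n) := by unfold Pre_find_common_ngrams; infer_instance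
def pvWitness_find_common_ngrams : List String × Int := (["abab", "abxab"], 2)

def Spec_find_common_ngrams (texts : List String) (n : Int) (out : List String) : Prop := out = find_common_ngrams_alt texts n
instance (texts : List String) (n : Int) (out : List String) : Decidable (Spec_find_common_ngrams texts n out) := by unfold Spec_find_common_ngrams; infer_instance

-- ===== CLAIM (what is proved, stated in full; the proofs are below) =====
def Claim_equal_find_common_ngrams : Prop := ∀ (texts : List String) (n : Int), Dom_find_common_ngrams texts n → Pre_find_common_ngrams texts n → Spec_find_common_ngrams texts n (find_common_ngrams texts n)

-- ===== LEMMAS AND PROOFS =====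

/-- The sliding-window n-gram list of one text (shared shape of both ports' inner loops). -/
def pvW (text : String) (n : Int) : List String :=
  (PySem.List.pyRange 0 (PySem.Str.len text - n + 1) 1).map
    (fun i => PySem.Str.slice text (some i) (some (i + n)))

/-- The distinct n-grams of one text, in first-occurrence order. -/
def pvS (text : String) (n : Int) : PySem.Set String := PySem.Set.ofList (pvW text n)

-- A's inner Counter loop has exactly the distinct window strings as keys.
theorem pvA_inner (text : String) (n : Int) :
    ((PySem.List.pyRange 0 (PySem.Str.len text - n + 1) 1).foldl
      (fun d i => d.modify (PySem.Str.slice text (some i) (some (i + n))) 0 (· + 1))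
      (PySem.Dict.empty : PySem.Dict String Int)).keys = pvS text n := by
  rw [PySem.Dict.keys_foldl_modify_key _ _ 0 (fun _ _ v => v + 1)]
  rfl

-- A's chained intersection is a filter by membership in every later set.
theorem pvFoldl_inter (sets : List (PySem.Set String)) (s : PySem.Set String) :
    sets.foldl (fun common t => PySem.Set.inter common t) s
      = s.filter (fun g => sets.all (fun t => PySem.Set.contains t g)) := by
  induction sets generalizing s with
  | nil => simp
  | cons t rest ih =>
    simp only [List.foldl_cons, ih, List.all_cons]
    show (s.filter (fun g => PySem.Set.contains t g)).filter _ = _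
    rw [List.filter_filter]
    exact List.filter_congr (fun x _ => by rw [Bool.and_comm])


/-- B's per-ngram step: record `g` once per text, bumping its global count on first sight. -/
def pvStep (st : PySem.Set String × PySem.Dict String Int) (g : String) :
    PySem.Set String × PySem.Dict String Int :=
  if PySem.Set.contains st.1 g then st
  else (PySem.Set.add st.1 g, st.2.insert g (st.2.getD g 0 + 1))

/-- B's global dict after all texts, in terms of `pvW`. -/
def pvCounts (texts : List String) (n : Int) : PySem.Dict String Int :=
  texts.foldl (fun d t => ((pvW t n).foldl pvStep (PySem.Set.empty, d)).2) PySem.Dict.empty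

theorem pvAlt_eq (texts : List String) (n : Int) :
    find_common_ngrams_alt texts n
      = PySem.Set.ofList (((pvCounts texts n).items.filter
          (fun p => p.2 == (texts.length : Int))).map (·.1)) := by
  unfold find_common_ngrams_alt pvCounts pvW pvStep
  simp only [List.foldl_map]

theorem pvB_inner_keys (l : List String) (seen : PySem.Set String) (d : PySem.Dict String Int)
    (h : ∀ x ∈ seen, x ∈ d.keys) :
    ((l.foldl pvStep (seen, d)).2).keys = PySem.Set.update d.keys l := by
  induction l generalizing seen d with
  | nil => simp [PySem.Set.update]
  | cons g l ih =>
    rw [List.foldl_cons, PySem.Set.update_cons]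
    by_cases hg : g ∈ seen
    · rw [show pvStep (seen, d) g = (seen, d) by
        unfold pvStep; rw [if_pos ((PySem.Set.contains_iff seen g).mpr hg)]]
      rw [ih seen d h, PySem.Set.add_of_mem (h g hg)]
    · rw [show pvStep (seen, d) g
          = (PySem.Set.add seen g, d.insert g (d.getD g 0 + 1)) by
        simp only [pvStep]
        rw [if_neg (by simp [hg])]]
      rw [ih _ _ (by
        intro x hx
        rcases (PySem.Set.mem_add seen g x).mp hx with hx' | rfl
        · exact (PySem.Dict.mem_keys_insert _ _ _ _).mpr (Or.inr (h x hx'))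
        · exact (PySem.Dict.mem_keys_insert _ _ _ _).mpr (Or.inl rfl))]
      congr 1
      by_cases hk : g ∈ d.keys
      · rw [PySem.Dict.keys_insert_of_contains d _ ((PySem.Dict.contains_iff_mem_keys d g).mpr hk),
            PySem.Set.add_of_mem hk]
      · rw [PySem.Dict.keys_insert_of_not_contains d _ (by
            cases hc : d.contains g
            · rfl
            · exact absurd ((PySem.Dict.contains_iff_mem_keys d g).mp hc) hk),
            PySem.Set.add_of_not_mem hk]

theorem pvB_inner_getD (l : List String) (seen : PySem.Set String) (d : PySem.Dict String Int)
    (g : String) :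
    ((l.foldl pvStep (seen, d)).2).getD g 0
      = d.getD g 0 + (if g ∈ l ∧ g ∉ seen then 1 else 0) := by
  induction l generalizing seen d with
  | nil => simp
  | cons g' l ih =>
    rw [List.foldl_cons]
    by_cases hg : g' ∈ seen
    · rw [show pvStep (seen, d) g' = (seen, d) by
        unfold pvStep; rw [if_pos ((PySem.Set.contains_iff seen g').mpr hg)]]
      rw [ih seen d]
      by_cases he : g = g'
      · subst he; simp [hg]
      · simp [List.mem_cons, he]
    · rw [show pvStep (seen, d) g'
          = (PySem.Set.add seen g', d.insert g' (d.getD g' 0 + 1)) by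
        simp only [pvStep]
        rw [if_neg (by simp [hg])]]
      rw [ih]
      by_cases he : g = g'
      · subst he
        rw [PySem.Dict.getD_insert_self]
        simp [hg]
      · rw [PySem.Dict.getD_insert_of_ne d _ _ he]
        have : (g ∈ PySem.Set.add seen g') ↔ g ∈ seen := by
          rw [PySem.Set.mem_add]; simp [he]
        simp [List.mem_cons, he, this]

theorem pvOuter_keys (n : Int) (texts : List String) :
    ∀ (d : PySem.Dict String Int),
    (texts.foldl (fun d t => ((pvW t n).foldl pvStep (PySem.Set.empty, d)).2) d).keys
      = PySem.Set.update d.keys (texts.flatMap (fun t => pvW t n)) := by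
  induction texts with
  | nil => intro d; simp [PySem.Set.update]
  | cons t ts ih =>
    intro d
    rw [List.foldl_cons, ih, pvB_inner_keys _ _ _ (by intro x hx; cases hx),
        List.flatMap_cons, PySem.Set.update_append]

theorem pvOuter_getD (n : Int) (g : String) (texts : List String) :
    ∀ (d : PySem.Dict String Int),
    (texts.foldl (fun d t => ((pvW t n).foldl pvStep (PySem.Set.empty, d)).2) d).getD g 0
      = d.getD g 0 + ((texts.countP (fun t => decide (g ∈ pvW t n))) : Int) := by
  induction texts with
  | nil => intro d; simp
  | cons t ts ih =>
    intro d
    rw [List.foldl_cons, ih, pvB_inner_getD, List.countP_cons]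
    by_cases h : g ∈ pvW t n
    · simp [h]; ring
    · simp [h]

theorem pvCounts_keys (texts : List String) (n : Int) :
    (pvCounts texts n).keys = PySem.Set.ofList (texts.flatMap (fun t => pvW t n)) := by
  unfold pvCounts
  rw [pvOuter_keys]
  rfl

theorem pvCounts_getD (texts : List String) (n : Int) (g : String) :
    (pvCounts texts n).getD g 0 = ((texts.countP (fun t => decide (g ∈ pvW t n))) : Int) := by
  unfold pvCounts
  rw [pvOuter_getD]
  simp

theorem pvAll_congr {α : Type} {l : List α} {f h : α → Bool}
    (he : ∀ t ∈ l, f t = h t) : l.all f = l.all h := by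
  induction l with
  | nil => rfl
  | cons a l ih =>
    simp [List.all_cons, he a (by simp), ih (fun t ht => he t (by simp [ht]))]

theorem pvA_eq (t0 : String) (ts : List String) (n : Int) :
    find_common_ngrams (t0 :: ts) n
      = (pvS t0 n).filter (fun g => ts.all (fun t => decide (g ∈ pvW t n))) := by
  unfold find_common_ngrams
  simp only [PySem.List.foldl_append_singleton_eq_map, List.nil_append]
  rw [List.map_congr_left (g := fun t => pvS t n) (fun t _ => by
        rw [pvA_inner]
        exact PySem.Set.ofList_ofList _)]
  rw [List.map_cons]
  show (ts.map (fun t => pvS t n)).foldl (fun common s => PySem.Set.inter common s) (pvS t0 n) = _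
  rw [pvFoldl_inter]
  apply List.filter_congr
  intro g _
  simp only [List.all_map]
  refine pvAll_congr (fun t _ => ?_)
  simp [pvS, Function.comp, PySem.Set.mem_ofList]

theorem pvB_eq (t0 : String) (ts : List String) (n : Int) :
    find_common_ngrams_alt (t0 :: ts) n
      = (pvCounts (t0 :: ts) n).keys.filter
          (fun g => (pvCounts (t0 :: ts) n).getD g 0 == ((t0 :: ts).length : Int)) := by
  rw [pvAlt_eq]
  have hnd : (pvCounts (t0 :: ts) n).keys.Nodup := by
    rw [pvCounts_keys]; exact PySem.Set.nodup_ofList _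
  rw [PySem.Dict.items_eq_map_keys _ hnd 0, List.filter_map, List.map_map]
  rw [show ((fun p : String × Int => p.1) ∘ fun k => (k, (pvCounts (t0 :: ts) n).getD k 0))
        = id by funext k; rfl, List.map_id]
  exact PySem.Set.ofList_eq_self_of_nodup _ (hnd.filter _)

theorem pvMain (t0 : String) (ts : List String) (n : Int) :
    find_common_ngrams (t0 :: ts) n = find_common_ngrams_alt (t0 :: ts) n := by
  rw [pvA_eq, pvB_eq, pvCounts_keys, List.flatMap_cons, PySem.Set.ofList_append,
      PySem.Set.update_eq_append_filter, List.filter_append]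
  have hlast : (List.filter (fun g => (pvCounts (t0 :: ts) n).getD g 0 == ((t0 :: ts).length : Int))
      (List.filter (fun y => !(PySem.Set.ofList (pvW t0 n)).contains y)
        (PySem.Set.ofList (ts.flatMap (fun t => pvW t n))))) = [] := by
    rw [List.filter_eq_nil_iff]
    intro g hg
    have hg0 : g ∉ pvW t0 n := by
      have := (List.mem_filter.mp hg).2
      simp at this
      simpa [PySem.Set.mem_ofList] using this
    rw [pvCounts_getD, List.countP_cons]
    have hle : ts.countP (fun t => decide (g ∈ pvW t n)) ≤ ts.length := List.countP_le_length
    simp only [hg0, decide_false, Bool.false_eq_true, if_false, add_zero,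
      List.length_cons, beq_iff_eq]
    intro hEq
    omega
  rw [hlast, List.append_nil]
  apply List.filter_congr
  intro g hg
  have hg0 : g ∈ pvW t0 n := (PySem.Set.mem_ofList (pvW t0 n) g).mp hg
  rw [pvCounts_getD, List.countP_cons]
  simp only [hg0, decide_true, if_true, List.length_cons]
  rw [Bool.eq_iff_iff]
  simp only [beq_iff_eq, List.all_eq_true, decide_eq_true_eq]
  have hle : ts.countP (fun t => decide (g ∈ pvW t n)) ≤ ts.length := List.countP_le_length
  constructor
  · intro h
    have hc : ts.countP (fun t => decide (g ∈ pvW t n)) = ts.length :=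
      List.countP_eq_length.mpr (fun t ht => decide_eq_true_eq.mpr (h t ht))
    simp [hc]
  · intro h
    have hc : ts.countP (fun t => decide (g ∈ pvW t n)) = ts.length := by
      have h' : ts.countP (fun t => decide (g ∈ pvW t n)) + 1 = ts.length + 1 := by
        exact_mod_cast h
      omega
    intro t ht
    exact decide_eq_true_eq.mp (List.countP_eq_length.mp hc t ht)

-- ===== VERDICT (by name: the statement is the Claim_ definition above) =====
theorem find_common_ngrams_spec : Claim_equal_find_common_ngrams := by
  intro texts n _ hpre
  unfold Spec_find_common_ngrams
  cases texts with
  | nil => exact absurd rfl hpre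
  | cons t0 ts => exact pvMain t0 ts n
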